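-- pv_equiv track=rewrite | github.com/Project-OSmOSE/OSEkit | src/OSmOSE/utils/core_utils.py | file_indexes_per_batch
-- ===== SOURCE A (Python) =====
-- def file_indexes_per_batch(
--     total_nb_files: int,
--     nb_batches: int,
-- ) -> list[tuple[int, int]]:
--     """Compute the start and stop file indexes for each batch.
--
--     The number of files is equitably distributed among batches.
--     Example: 10 files distributed among 4 batches will lead to
--     batches indexes [(0,3), (3,6), (6,8), (8,10)].
--
--     Parameters
--     ----------
--     total_nb_files: int
--         Number of files processed by ball batches
--     nb_batches: int
--         Number of batches in the analysis
--
--     Returns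
--     -------
--     list[tuple[int,int]]:
--     A list of tuples representing the start and stop index of files processed by each batch in the analysis.
--
--     Examples
--     --------
--     >>> file_indexes_per_batch(10,4)
--     [(0, 3), (3, 6), (6, 8), (8, 10)]
--     >>> file_indexes_per_batch(1448,10)
--     [(0, 145), (145, 290), (290, 435), (435, 580), (580, 725), (725, 870), (870, 1015), (1015, 1160), (1160, 1304), (1304, 1448)]
--
--     """
--     batch_lengths = [
--         length
--         for length in nb_files_per_batch(total_nb_files, nb_batches)
--         if length > 0
--     ]
--     return [
--         (sum(batch_lengths[:b]), sum(batch_lengths[:b]) + batch_lengths[b])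
--         for b in range(len(batch_lengths))
--     ]
--
-- def nb_files_per_batch(total_nb_files: int, nb_batches: int) -> list[int]:
--     """Compute the number of files processed by each batch in the analysis.
--
--     The number of files is equitably distributed among batches.
--     Example: 10 files distributed among 4 batches will lead to
--     batches containing [3,3,2,2] files.
--
--     Parameters
--     ----------
--     total_nb_files: int
--         Number of files processed by ball batches
--     nb_batches: int
--         Number of batches in the analysis
--
--     Returns
--     -------
--     list(int):
--     A list representing the number of files processed by each batch in the analysis.
--
--     Examples
--     --------
--     >>> nb_files_per_batch(10,4)
--     [3, 3, 2, 2]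
--     >>> nb_files_per_batch(1448,10)
--     [145, 145, 145, 145, 145, 145, 145, 145, 144, 144]
--
--     """
--     return [
--         total_nb_files // nb_batches + (1 if i < total_nb_files % nb_batches else 0)
--         for i in range(nb_batches)
--     ]
-- ===== SOURCE B (Python) =====
-- def file_indexes_per_batch(total_nb_files, nb_batches):
--     """Single pass with a running prefix sum instead of repeated sum(slice)."""
--     if nb_batches <= 0:
--         return []
--     q, r = divmod(total_nb_files, nb_batches)
--     result = []
--     start = 0
--     for i in range(nb_batches):
--         length = q + 1 if i < r else q
--         if length > 0:
--             result.append((start, start + length))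
--             start += length
--     return result
-- ===== Notes on version B (the rewrite author's own statement) =====
-- stated objective: faster
-- what changed: Replaces the per-batch sum(batch_lengths[:b]) recomputation with a single pass that carries a running start offset (prefix sum), computing each batch length on the fly instead of materialising and re-summing the length list.
import Mathlib
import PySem

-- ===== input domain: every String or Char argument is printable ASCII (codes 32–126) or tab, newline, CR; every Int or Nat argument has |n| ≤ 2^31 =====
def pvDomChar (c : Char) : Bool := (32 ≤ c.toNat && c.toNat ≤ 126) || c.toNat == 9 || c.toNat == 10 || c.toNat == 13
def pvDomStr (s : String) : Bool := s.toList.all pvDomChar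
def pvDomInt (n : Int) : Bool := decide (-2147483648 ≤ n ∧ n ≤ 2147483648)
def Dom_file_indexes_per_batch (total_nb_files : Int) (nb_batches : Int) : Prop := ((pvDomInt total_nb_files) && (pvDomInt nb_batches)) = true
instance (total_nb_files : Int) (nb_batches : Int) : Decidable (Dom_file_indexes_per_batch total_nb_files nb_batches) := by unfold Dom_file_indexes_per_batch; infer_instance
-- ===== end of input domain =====

-- B computes the same batch index ranges in one pass with a running prefix sum
-- instead of A's repeated sum(batch_lengths[:b]); proved equal on all inputs.

-- ===== PORT A =====
-- helper nb_files_per_batch: [t // n + (1 if i < t % n else 0) for i in range(n)]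
-- (the division is only evaluated when the range is non-empty in Python; here the
-- map over an empty list likewise never evaluates the body)
def nb_files_per_batch (total_nb_files : Int) (nb_batches : Int) : List Int :=
  (PySem.List.pyRange 0 nb_batches 1).map (fun i =>
    PySem.Int.floordiv total_nb_files nb_batches +
      (if i < PySem.Int.mod total_nb_files nb_batches then 1 else 0))

def file_indexes_per_batch (total_nb_files : Int) (nb_batches : Int) : List (Int × Int) :=
  let batch_lengths :=
    (nb_files_per_batch total_nb_files nb_batches).filter (fun l => decide (0 < l))
  (PySem.List.pyRange 0 (PySem.List.len batch_lengths) 1).map (fun b =>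
    ((PySem.List.slice batch_lengths none (some b)).sum,
     (PySem.List.slice batch_lengths none (some b)).sum +
       -- batch_lengths[b]: b ranges over 0..len-1, so the index is always in range
       PySem.List.pyGetD batch_lengths b 0))

-- ===== PORT B =====
def file_indexes_per_batch_alt (total_nb_files : Int) (nb_batches : Int) : List (Int × Int) :=
  if nb_batches ≤ 0 then []
  else
    let q := PySem.Int.floordiv total_nb_files nb_batches
    let r := PySem.Int.mod total_nb_files nb_batches
    ((PySem.List.pyRange 0 nb_batches 1).foldl
      (fun (st : Int × List (Int × Int)) i =>
        let length := if i < r then q + 1 else q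
        if 0 < length then (st.1 + length, st.2 ++ [(st.1, st.1 + length)]) else st)
      (0, [])).2

-- ===== PRECONDITION & SPEC =====
def Spec_file_indexes_per_batch (total_nb_files : Int) (nb_batches : Int) (out : List (Int × Int)) : Prop := out = file_indexes_per_batch_alt total_nb_files nb_batches
instance (total_nb_files : Int) (nb_batches : Int) (out : List (Int × Int)) : Decidable (Spec_file_indexes_per_batch total_nb_files nb_batches out) := by unfold Spec_file_indexes_per_batch; infer_instance

-- ===== CLAIM (what is proved, stated in full; the proofs are below) =====
def Claim_equal_file_indexes_per_batch : Prop := ∀ (total_nb_files : Int) (nb_batches : Int), Dom_file_indexes_per_batch total_nb_files nb_batches → Spec_file_indexes_per_batch total_nb_files nb_batches (file_indexes_per_batch total_nb_files nb_batches)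

-- ===== LEMMAS AND PROOFS =====

-- the common value of both programs: start/stop pairs of a list of lengths from offset s
def pairsFrom : List Int → Int → List (Int × Int)
  | [], _ => []
  | x :: xs, s => (s, s + x) :: pairsFrom xs (s + x)

-- A's prefix-sum-by-slicing form equals pairsFrom
theorem pairsFrom_eq_map (bl : List Int) (s : Int) :
    pairsFrom bl s = (List.range bl.length).map
      (fun k => (s + (bl.take k).sum, s + (bl.take k).sum + bl.getD k 0)) := by
  induction bl generalizing s with
  | nil => simp [pairsFrom]
  | cons x xs ih =>
      rw [List.length_cons, List.range_succ_eq_map, List.map_cons, List.map_map]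
      simp only [pairsFrom]
      congr 1
      · simp
      · rw [ih (s + x)]
        refine List.map_congr_left (fun k _ => ?_)
        simp [add_assoc]

-- B's accumulating fold over the index range equals pairsFrom of the positive-filtered lengths
theorem foldl_step_range (g : Int → Int) (L : List Int) (s : Int) (acc : List (Int × Int)) :
    (L.foldl (fun (st : Int × List (Int × Int)) i =>
        if 0 < g i then (st.1 + g i, st.2 ++ [(st.1, st.1 + g i)]) else st) (s, acc)) =
      (s + ((L.map g).filter (fun l => decide (0 < l))).sum,
       acc ++ pairsFrom ((L.map g).filter (fun l => decide (0 < l))) s) := by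
  induction L generalizing s acc with
  | nil => simp [pairsFrom]
  | cons x xs ih =>
      by_cases hx : 0 < g x
      · simp [hx, ih, pairsFrom, add_assoc]
      · simp [hx, ih]

theorem file_indexes_per_batch_spec' (t n : Int) :
    file_indexes_per_batch t n = file_indexes_per_batch_alt t n := by
  by_cases hn : n ≤ 0
  · simp [file_indexes_per_batch, file_indexes_per_batch_alt, nb_files_per_batch,
      PySem.List.pyRange_one_eq_nil hn, hn]
  · have hg : ∀ i : Int, (if i < PySem.Int.mod t n then PySem.Int.floordiv t n + 1
        else PySem.Int.floordiv t n) = PySem.Int.floordiv t n +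
          (if i < PySem.Int.mod t n then 1 else 0) := by
      intro i; split_ifs <;> simp
    have hB : file_indexes_per_batch_alt t n =
        pairsFrom ((nb_files_per_batch t n).filter (fun l => decide (0 < l))) 0 := by
      unfold file_indexes_per_batch_alt
      rw [if_neg hn]
      show (List.foldl (fun (st : Int × List (Int × Int)) i =>
          if 0 < (if i < PySem.Int.mod t n then PySem.Int.floordiv t n + 1
              else PySem.Int.floordiv t n) then
            (st.1 + (if i < PySem.Int.mod t n then PySem.Int.floordiv t n + 1
              else PySem.Int.floordiv t n),
             st.2 ++ [(st.1, st.1 + (if i < PySem.Int.mod t n then PySem.Int.floordiv t n + 1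
              else PySem.Int.floordiv t n))]) else st)
        (0, []) (PySem.List.pyRange 0 n 1)).2 = _
      rw [foldl_step_range (fun i => if i < PySem.Int.mod t n then PySem.Int.floordiv t n + 1
        else PySem.Int.floordiv t n)]
      simp only [List.nil_append, nb_files_per_batch]
      congr 2
      exact List.map_congr_left (fun i _ => hg i)
    rw [hB]
    unfold file_indexes_per_batch
    set bl := (nb_files_per_batch t n).filter (fun l => decide (0 < l)) with hbl
    show List.map (fun b =>
        ((PySem.List.slice bl none (some b)).sum,
         (PySem.List.slice bl none (some b)).sum + PySem.List.pyGetD bl b 0))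
      (PySem.List.pyRange 0 (PySem.List.len bl) 1) = pairsFrom bl 0
    rw [pairsFrom_eq_map bl 0, PySem.List.len_eq, PySem.List.pyRange_zero_nat, List.map_map]
    refine List.map_congr_left (fun k _ => ?_)
    simp [PySem.List.slice_to_natCast]

-- ===== VERDICT (by name: the statement is the Claim_ definition above) =====
theorem file_indexes_per_batch_spec : Claim_equal_file_indexes_per_batch := by
  intro t n _
  exact file_indexes_per_batch_spec' t n
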